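-- pv_equiv track=rewrite | github.com/dStensland/LostCity | crawlers/sources/ponce_city_market.py | infer_category_from_title
-- ===== SOURCE A (Python) =====
-- from typing import Optional
--
-- def infer_category_from_title(title: str) -> tuple[str, Optional[str]]:
--     """Infer event category and subcategory from the title text."""
--     t = title.lower()
--
--     if any(w in t for w in ["cocktail", "wine", "tasting", "beer", "brunch", "dinner", "pasta", "cooking", "chef"]):
--         return "food_drink", None
--     if any(w in t for w in ["run club", "running"]):
--         return "fitness", "fitness.running"
--     if any(w in t for w in ["yoga"]):
--         return "fitness", "fitness.yoga"
--     if any(w in t for w in ["fitness", "stroll", "workout", "pilates"]):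
--         return "fitness", None
--     if any(w in t for w in ["concert", "live music", "dj", "band", "jazz", "soul", "acoustic"]):
--         return "music", None
--     if any(w in t for w in ["art", "gallery", "exhibition", "paint", "craft", "maker"]):
--         return "art", None
--     if any(w in t for w in ["market", "pop-up", "pop up", "vendor", "shop", "shopping"]):
--         return "shopping", None
--     if any(w in t for w in ["valentine", "lunar new year", "holiday", "celebration", "festival"]):
--         return "community", None
--     if any(w in t for w in ["comedy", "stand-up", "standup", "improv", "laugh"]):
--         return "comedy", None
--     if any(w in t for w in ["film", "movie", "screening", "cinema"]):
--         return "film", None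
--
--     return "community", None
-- ===== SOURCE B (Python) =====
-- from typing import Optional
--
-- # Flat index: keyword -> priority of the rule it triggers (lower = higher priority).
-- _KEYWORD_PRIORITY = {
--     "cocktail": 0, "wine": 0, "tasting": 0, "beer": 0, "brunch": 0,
--     "dinner": 0, "pasta": 0, "cooking": 0, "chef": 0,
--     "run club": 1, "running": 1,
--     "yoga": 2,
--     "fitness": 3, "stroll": 3, "workout": 3, "pilates": 3,
--     "concert": 4, "live music": 4, "dj": 4, "band": 4, "jazz": 4,
--     "soul": 4, "acoustic": 4,
--     "art": 5, "gallery": 5, "exhibition": 5, "paint": 5, "craft": 5, "maker": 5,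
--     "market": 6, "pop-up": 6, "pop up": 6, "vendor": 6, "shop": 6, "shopping": 6,
--     "valentine": 7, "lunar new year": 7, "holiday": 7, "celebration": 7, "festival": 7,
--     "comedy": 8, "stand-up": 8, "standup": 8, "improv": 8, "laugh": 8,
--     "film": 9, "movie": 9, "screening": 9, "cinema": 9,
-- }
--
-- # Result for each priority; index 10 is the default when nothing matches.
-- _RESULTS = [
--     ("food_drink", None),
--     ("fitness", "fitness.running"),
--     ("fitness", "fitness.yoga"),
--     ("fitness", None),
--     ("music", None),
--     ("art", None),
--     ("shopping", None),
--     ("community", None),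
--     ("comedy", None),
--     ("film", None),
--     ("community", None),
-- ]
--
--
-- def infer_category_from_title(title: str) -> tuple[str, Optional[str]]:
--     """Infer event category and subcategory from the title text."""
--     t = title.lower()
--     best = min((p for kw, p in _KEYWORD_PRIORITY.items() if kw in t), default=10)
--     return _RESULTS[best]
-- ===== Notes on version B (the rewrite author's own statement) =====
-- stated objective: alternative
-- what changed: Instead of scanning ten ordered keyword groups with early-exit returns, B builds a flat keyword->priority index, aggregates the priorities of ALL matching keywords with min() (default 10), and looks the answer up in a results table indexed by that minimum priority.
import Mathlib
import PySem

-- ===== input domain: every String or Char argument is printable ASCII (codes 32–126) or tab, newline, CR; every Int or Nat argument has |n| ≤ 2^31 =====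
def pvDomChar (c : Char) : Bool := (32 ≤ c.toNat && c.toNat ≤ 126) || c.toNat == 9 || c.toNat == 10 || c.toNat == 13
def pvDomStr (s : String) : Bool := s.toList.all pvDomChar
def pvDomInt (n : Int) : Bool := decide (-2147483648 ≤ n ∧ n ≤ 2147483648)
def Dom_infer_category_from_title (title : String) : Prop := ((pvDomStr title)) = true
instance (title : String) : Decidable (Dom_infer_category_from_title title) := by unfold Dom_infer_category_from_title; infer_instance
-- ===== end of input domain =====

-- B replaces A's ten early-exit keyword-group branches by a flat keyword->priority index,
-- a min-aggregation over all matching keywords, and a results-table lookup (alternative).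

-- ===== PORT A =====
def infer_category_from_title (title : String) : String × Option String :=
  let t := PySem.Str.lower title
  if ["cocktail", "wine", "tasting", "beer", "brunch", "dinner", "pasta", "cooking", "chef"].any (fun w => PySem.Str.isIn w t) then ("food_drink", none) else
  if ["run club", "running"].any (fun w => PySem.Str.isIn w t) then ("fitness", some "fitness.running") else
  if ["yoga"].any (fun w => PySem.Str.isIn w t) then ("fitness", some "fitness.yoga") else
  if ["fitness", "stroll", "workout", "pilates"].any (fun w => PySem.Str.isIn w t) then ("fitness", none) else
  if ["concert", "live music", "dj", "band", "jazz", "soul", "acoustic"].any (fun w => PySem.Str.isIn w t) then ("music", none) else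
  if ["art", "gallery", "exhibition", "paint", "craft", "maker"].any (fun w => PySem.Str.isIn w t) then ("art", none) else
  if ["market", "pop-up", "pop up", "vendor", "shop", "shopping"].any (fun w => PySem.Str.isIn w t) then ("shopping", none) else
  if ["valentine", "lunar new year", "holiday", "celebration", "festival"].any (fun w => PySem.Str.isIn w t) then ("community", none) else
  if ["comedy", "stand-up", "standup", "improv", "laugh"].any (fun w => PySem.Str.isIn w t) then ("comedy", none) else
  if ["film", "movie", "screening", "cinema"].any (fun w => PySem.Str.isIn w t) then ("film", none) else
  ("community", none)

-- ===== PORT B =====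
-- flat keyword -> priority index of Source B (_KEYWORD_PRIORITY, in insertion order)
def pvKeywordPriority : List (String × Nat) := [
  ("cocktail", 0), ("wine", 0), ("tasting", 0), ("beer", 0), ("brunch", 0),
  ("dinner", 0), ("pasta", 0), ("cooking", 0), ("chef", 0),
  ("run club", 1), ("running", 1),
  ("yoga", 2),
  ("fitness", 3), ("stroll", 3), ("workout", 3), ("pilates", 3),
  ("concert", 4), ("live music", 4), ("dj", 4), ("band", 4), ("jazz", 4),
  ("soul", 4), ("acoustic", 4),
  ("art", 5), ("gallery", 5), ("exhibition", 5), ("paint", 5), ("craft", 5), ("maker", 5),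
  ("market", 6), ("pop-up", 6), ("pop up", 6), ("vendor", 6), ("shop", 6), ("shopping", 6),
  ("valentine", 7), ("lunar new year", 7), ("holiday", 7), ("celebration", 7), ("festival", 7),
  ("comedy", 8), ("stand-up", 8), ("standup", 8), ("improv", 8), ("laugh", 8),
  ("film", 9), ("movie", 9), ("screening", 9), ("cinema", 9)]

-- results table of Source B (_RESULTS; index 10 is the no-match default)
def pvResults : List (String × Option String) := [
  ("food_drink", none),
  ("fitness", some "fitness.running"),
  ("fitness", some "fitness.yoga"),
  ("fitness", none),
  ("music", none),
  ("art", none),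
  ("shopping", none),
  ("community", none),
  ("comedy", none),
  ("film", none),
  ("community", none)]

def infer_category_from_title_alt (title : String) : String × Option String :=
  let t := PySem.Str.lower title
  let best := (pvKeywordPriority.filterMap
    (fun kp => if PySem.Str.isIn kp.1 t then some kp.2 else none)).foldl Nat.min 10
  pvResults.getD best ("community", none)

-- ===== PRECONDITION & SPEC =====
def Spec_infer_category_from_title (title : String) (out : String × Option String) : Prop := out = infer_category_from_title_alt title
instance (title : String) (out : String × Option String) : Decidable (Spec_infer_category_from_title title out) := by unfold Spec_infer_category_from_title; infer_instance

-- ===== CLAIM (what is proved, stated in full; the proofs are below) =====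
def Claim_equal_infer_category_from_title : Prop := ∀ (title : String), Dom_infer_category_from_title title → Spec_infer_category_from_title title (infer_category_from_title title)

-- ===== LEMMAS AND PROOFS =====

-- folding min over the matched keywords of one priority group contributes min acc p iff some keyword matched
theorem pv_fold_group (ws : List String) (p : Nat) (L : List Char) (acc : Nat) :
    (ws.filterMap (fun x => if PySem.Chars.isIn x.toList L = true then some p else none)).foldl Nat.min acc
    = if ∃ x ∈ ws, PySem.Chars.isIn x.toList L = true then Nat.min acc p else acc := by
  induction ws generalizing acc with
  | nil => simp
  | cons w ws ih =>
    by_cases h : PySem.Chars.isIn w.toList L = true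
    · simp only [List.filterMap_cons, h, if_true, List.foldl_cons, ih]
      by_cases h2 : ∃ x ∈ ws, PySem.Chars.isIn x.toList L = true
      · rw [if_pos h2, if_pos ⟨w, by simp [h]⟩]
        simp only [Nat.min_def]; split_ifs <;> omega
      · rw [if_neg h2, if_pos ⟨w, by simp [h]⟩]
    · rw [Bool.not_eq_true] at h
      simp only [List.filterMap_cons, h, Bool.false_eq_true, if_false, ih]
      by_cases h2 : ∃ x ∈ ws, PySem.Chars.isIn x.toList L = true
      · rw [if_pos h2, if_pos (by obtain ⟨x, hx, hx2⟩ := h2; exact ⟨x, List.mem_cons_of_mem _ hx, hx2⟩)]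
      · rw [if_neg h2, if_neg (by rintro ⟨x, hx, hx2⟩; rcases List.mem_cons.mp hx with rfl | hx
                                  · exact absurd hx2 (by simp [h])
                                  · exact h2 ⟨x, hx, hx2⟩)]

-- ===== VERDICT (by name: the statement is the Claim_ definition above) =====
set_option maxHeartbeats 2000000 in
theorem infer_category_from_title_spec : Claim_equal_infer_category_from_title := by
  intro title _
  unfold Spec_infer_category_from_title infer_category_from_title infer_category_from_title_alt
  have hsplit : pvKeywordPriority =
    (["cocktail", "wine", "tasting", "beer", "brunch", "dinner", "pasta", "cooking", "chef"].map (fun w => (w, 0))) ++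
    (["run club", "running"].map (fun w => (w, 1))) ++
    (["yoga"].map (fun w => (w, 2))) ++
    (["fitness", "stroll", "workout", "pilates"].map (fun w => (w, 3))) ++
    (["concert", "live music", "dj", "band", "jazz", "soul", "acoustic"].map (fun w => (w, 4))) ++
    (["art", "gallery", "exhibition", "paint", "craft", "maker"].map (fun w => (w, 5))) ++
    (["market", "pop-up", "pop up", "vendor", "shop", "shopping"].map (fun w => (w, 6))) ++
    (["valentine", "lunar new year", "holiday", "celebration", "festival"].map (fun w => (w, 7))) ++
    (["comedy", "stand-up", "standup", "improv", "laugh"].map (fun w => (w, 8))) ++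
    (["film", "movie", "screening", "cinema"].map (fun w => (w, 9))) := by rfl
  rw [hsplit]
  simp only [List.filterMap_append, List.foldl_append]
  by_cases h0 : (["cocktail", "wine", "tasting", "beer", "brunch", "dinner", "pasta", "cooking", "chef"].any fun w => PySem.Str.isIn w (PySem.Str.lower title)) = true
  · simp_all [pv_fold_group, pvResults]
  by_cases h1 : (["run club", "running"].any fun w => PySem.Str.isIn w (PySem.Str.lower title)) = true
  · simp_all [pv_fold_group, pvResults]
  by_cases h2 : (["yoga"].any fun w => PySem.Str.isIn w (PySem.Str.lower title)) = true
  · simp_all [pv_fold_group, pvResults]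
  by_cases h3 : (["fitness", "stroll", "workout", "pilates"].any fun w => PySem.Str.isIn w (PySem.Str.lower title)) = true
  · simp_all [pv_fold_group, pvResults]
  by_cases h4 : (["concert", "live music", "dj", "band", "jazz", "soul", "acoustic"].any fun w => PySem.Str.isIn w (PySem.Str.lower title)) = true
  · simp_all [pv_fold_group, pvResults]
  by_cases h5 : (["art", "gallery", "exhibition", "paint", "craft", "maker"].any fun w => PySem.Str.isIn w (PySem.Str.lower title)) = true
  · simp_all [pv_fold_group, pvResults]
  by_cases h6 : (["market", "pop-up", "pop up", "vendor", "shop", "shopping"].any fun w => PySem.Str.isIn w (PySem.Str.lower title)) = true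
  · simp_all [pv_fold_group, pvResults]
  by_cases h7 : (["valentine", "lunar new year", "holiday", "celebration", "festival"].any fun w => PySem.Str.isIn w (PySem.Str.lower title)) = true
  · simp_all [pv_fold_group, pvResults]
  by_cases h8 : (["comedy", "stand-up", "standup", "improv", "laugh"].any fun w => PySem.Str.isIn w (PySem.Str.lower title)) = true
  · simp_all [pv_fold_group, pvResults]
  by_cases h9 : (["film", "movie", "screening", "cinema"].any fun w => PySem.Str.isIn w (PySem.Str.lower title)) = true
  · simp_all [pv_fold_group, pvResults]
  simp_all [pvResults]
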